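-- pv_equiv track=rewrite | github.com/vivianLL/LeetCode | T13_MovingCount.py | allow
-- ===== SOURCE A (Python) =====
-- def allow(threshold, row, col):
--     n = 0
--     while row != 0:
--         n += row % 10
--         row = row // 10
--     while col != 0:
--         n += col % 10
--         col = col // 10
--
--     if n > threshold:
--         return False
--     else:
--         return True
-- ===== SOURCE B (Python) =====
-- def _digit_sum(n):
--     return sum(ord(ch) - 48 for ch in str(n))
--
--
-- def allow(threshold, row, col):
--     return _digit_sum(row) + _digit_sum(col) <= threshold
-- ===== Notes on version B (the rewrite author's own statement) =====
-- stated objective: idiomatic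
-- what changed: B computes each digit sum by iterating over the decimal string representation (ord(ch)-48 per character) instead of A's two while-loops peeling digits off with % 10 and // 10, and returns the comparison directly instead of an if/else over a running accumulator.
import Mathlib
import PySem

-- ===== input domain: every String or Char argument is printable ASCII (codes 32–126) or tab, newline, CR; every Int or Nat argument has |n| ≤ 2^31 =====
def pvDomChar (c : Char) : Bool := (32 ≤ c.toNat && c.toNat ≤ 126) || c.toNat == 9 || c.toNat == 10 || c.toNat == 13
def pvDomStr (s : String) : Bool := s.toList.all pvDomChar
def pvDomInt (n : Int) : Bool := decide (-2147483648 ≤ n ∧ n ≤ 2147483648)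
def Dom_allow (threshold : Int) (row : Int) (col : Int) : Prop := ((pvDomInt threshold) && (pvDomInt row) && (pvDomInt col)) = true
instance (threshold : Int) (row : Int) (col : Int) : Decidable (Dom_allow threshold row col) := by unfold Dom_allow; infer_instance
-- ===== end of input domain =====

-- B computes the digit sums by walking the decimal string (ord(ch)-48 per character)
-- instead of A's two %10 / //10 while-loops; equivalence proved on nonnegative row/col.

-- ===== PORT A =====
-- Python's 'while x != 0' loop; on x < 0 the Python loop never terminates (those inputs
-- are outside Pre_allow), so the dite guard uses 0 < x purely for totality.
def allowLoopA (n : Int) (x : Int) : Int :=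
  if _h : 0 < x then
    allowLoopA (n + PySem.Int.mod x 10) (PySem.Int.floordiv x 10)
  else n
termination_by x.toNat
decreasing_by
  have hd : PySem.Int.floordiv x 10 = x / 10 := PySem.Int.floordiv_eq_ediv_of_pos (by omega)
  rw [hd]; omega

def allow (threshold : Int) (row : Int) (col : Int) : Bool :=
  let n := allowLoopA 0 row
  let n := allowLoopA n col
  if n > threshold then false else true

-- ===== PORT B =====
def digitSumB (n : Int) : Int :=
  (PySem.Int.toStr n).toList.foldl (fun a c => a + ((c.toNat : Int) - 48)) 0

def allow_alt (threshold : Int) (row : Int) (col : Int) : Bool :=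
  decide (digitSumB row + digitSumB col ≤ threshold)

-- ===== PRECONDITION & SPEC =====
-- Pre_ excludes negative row/col: there Python A's while-loops never terminate
-- (e.g. -1 % 10 = 9, -1 // 10 = -1 forever), so A returns on exactly these inputs.
def Pre_allow (threshold : Int) (row : Int) (col : Int) : Prop := 0 ≤ row ∧ 0 ≤ col
instance (threshold : Int) (row : Int) (col : Int) : Decidable (Pre_allow threshold row col) := by unfold Pre_allow; infer_instance

def pvWitness_allow : Int × Int × Int := (10, 35, 7)

def Spec_allow (threshold : Int) (row : Int) (col : Int) (out : Bool) : Prop := out = allow_alt threshold row col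
instance (threshold : Int) (row : Int) (col : Int) (out : Bool) : Decidable (Spec_allow threshold row col out) := by unfold Spec_allow; infer_instance

-- ===== CLAIM (what is proved, stated in full; the proofs are below) =====
def Claim_equal_allow : Prop := ∀ (threshold : Int) (row : Int) (col : Int), Dom_allow threshold row col → Pre_allow threshold row col → Spec_allow threshold row col (allow threshold row col)

-- ===== LEMMAS AND PROOFS =====

-- reference digit sum on Nat
def dsN (n : Nat) : Nat :=
  if n = 0 then 0 else n % 10 + dsN (n / 10)
decreasing_by exact Nat.div_lt_self (by omega) (by omega)

theorem dsN_lt_ten {n : Nat} (h : n < 10) : dsN n = n := by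
  unfold dsN
  by_cases h0 : n = 0
  · simp [h0]
  · rw [if_neg h0, Nat.mod_eq_of_lt h, Nat.div_eq_of_lt h]
    unfold dsN; simp

theorem allowLoopA_eq (m : Nat) : ∀ (a : Int), allowLoopA a (m : Int) = a + (dsN m : Int) := by
  induction m using Nat.strong_induction_on with
  | _ m ih =>
    intro a
    by_cases h0 : m = 0
    · subst h0
      unfold allowLoopA
      rw [dif_neg (by omega)]
      unfold dsN; simp
    · unfold allowLoopA
      rw [dif_pos (by exact_mod_cast Nat.pos_of_ne_zero h0)]
      have h1 : PySem.Int.mod (m : Int) 10 = ((m % 10 : Nat) : Int) := by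
        exact_mod_cast PySem.Int.mod_natCast m 10
      have h2 : PySem.Int.floordiv (m : Int) 10 = ((m / 10 : Nat) : Int) := by
        exact_mod_cast PySem.Int.floordiv_natCast m 10
      rw [h1, h2]
      rw [ih (m / 10) (Nat.div_lt_self (Nat.pos_of_ne_zero h0) (by omega))]
      have : dsN m = m % 10 + dsN (m / 10) := by rw [dsN, if_neg h0]
      rw [this]; push_cast; ring

def chVal (c : Char) : Int := (c.toNat : Int) - 48

theorem digitChar_val {d : Nat} (h : d < 10) : chVal (Nat.digitChar d) = (d : Int) := by
  interval_cases d <;> decide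

def chSum (cs : List Char) : Int := (cs.map chVal).sum

theorem foldl_chSum (cs : List Char) : ∀ (a : Int),
    cs.foldl (fun a c => a + ((c.toNat : Int) - 48)) a = a + chSum cs := by
  induction cs with
  | nil => intro a; simp [chSum]
  | cons c cs ih => intro a; simp [chSum, chVal, List.foldl_cons, ih]; ring

theorem tdc_append (f : Nat) : ∀ (n : Nat) (l : List Char),
    Nat.toDigitsCore 10 f n l = Nat.toDigitsCore 10 f n [] ++ l := by
  induction f with
  | zero => intro n l; simp [Nat.toDigitsCore]
  | succ f ih =>
    intro n l
    simp only [Nat.toDigitsCore]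
    by_cases h : n / 10 = 0
    · simp [h]
    · rw [if_neg h, if_neg h, ih (n / 10) [(n % 10).digitChar], ih (n / 10) ((n % 10).digitChar :: l)]
      simp

theorem chSum_toDigitsCore (f : Nat) : ∀ (n : Nat), n < 10 ^ f →
    chSum (Nat.toDigitsCore 10 f n []) = (dsN n : Int) := by
  induction f with
  | zero =>
    intro n hn
    have : n = 0 := by omega
    subst this
    simp [Nat.toDigitsCore, chSum, dsN]
  | succ f ih =>
    intro n hn
    simp only [Nat.toDigitsCore]
    by_cases h : n / 10 = 0
    · have hlt : n < 10 := by omega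
      rw [if_pos h]
      simp [chSum, Nat.mod_eq_of_lt hlt, digitChar_val hlt, dsN_lt_ten hlt]
    · rw [if_neg h, tdc_append f (n / 10) [(n % 10).digitChar]]
      have hdiv : n / 10 < 10 ^ f := by
        have hmul : n < 10 ^ f * 10 := by rw [← pow_succ]; exact hn
        exact (Nat.div_lt_iff_lt_mul (by omega)).mpr hmul
      have hmod : n % 10 < 10 := Nat.mod_lt _ (by omega)
      have hds : dsN n = n % 10 + dsN (n / 10) := by
        rw [dsN, if_neg (by omega)]
      simp only [chSum, List.map_append, List.sum_append]
      have := ih (n / 10) hdiv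
      simp only [chSum] at this
      rw [this]
      simp [digitChar_val hmod, hds]
      ring

theorem digitSumB_eq (m : Nat) : digitSumB (m : Int) = (dsN m : Int) := by
  unfold digitSumB
  rw [PySem.Int.toList_toStr]
  unfold PySem.Int.toChars
  rw [if_neg (by omega)]
  have hlt : ((m : Int).toNat) < 10 ^ ((m : Int).toNat + 1) := by
    calc (m : Int).toNat < 10 ^ (m : Int).toNat := Nat.lt_pow_self (by omega)
    _ ≤ 10 ^ ((m : Int).toNat + 1) := Nat.pow_le_pow_right (by omega) (by omega)
  rw [foldl_chSum]
  have := chSum_toDigitsCore ((m : Int).toNat + 1) ((m : Int).toNat) hlt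
  unfold Nat.toDigits
  rw [this]
  simp

-- ===== VERDICT (by name: the statement is the Claim_ definition above) =====
theorem allow_spec : Claim_equal_allow := by
  intro threshold row col _ hpre
  obtain ⟨hr, hc⟩ := hpre
  obtain ⟨m, rfl⟩ := Int.eq_ofNat_of_zero_le hr
  obtain ⟨k, rfl⟩ := Int.eq_ofNat_of_zero_le hc
  unfold Spec_allow allow allow_alt
  show (if allowLoopA (allowLoopA 0 (m : Int)) (k : Int) > threshold then false else true)
      = decide (digitSumB (m : Int) + digitSumB (k : Int) ≤ threshold)
  rw [allowLoopA_eq m 0, allowLoopA_eq k, digitSumB_eq m, digitSumB_eq k]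
  by_cases h : (dsN m : Int) + (dsN k : Int) ≤ threshold
  · rw [if_neg (by omega)]
    simp [h]
  · rw [if_pos (by omega)]
    simp [h]
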